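-- pv_equiv track=rewrite | github.com/ZeNGrooT147/VTU_SGPA_CALCULATOR | api/parse_pdf.py | calculate_grade_point
-- ===== SOURCE A (Python) =====
-- VTU_SCHEMES = {
--     "2022": {
--         "marks_to_grade": {
--             90: "O", 80: "A+", 70: "A", 60: "B+", 50: "B", 40: "C", 0: "F"
--         },
--         "grading": {
--             "O": 10, "A+": 9, "A": 8, "B+": 7, "B": 6, "C": 5, "F": 0
--         }
--     },
--     "2021": {
--         "marks_to_grade": {
--             90: "O", 80: "A+", 70: "A", 60: "B+", 50: "B", 40: "C", 0: "F"
--         },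
--         "grading": {
--             "O": 10, "A+": 9, "A": 8, "B+": 7, "B": 6, "C": 5, "F": 0
--         }
--     },
--     "2018": {
--         "marks_to_grade": {
--             90: "O", 80: "A+", 70: "A", 60: "B+", 50: "B", 40: "C", 0: "F"
--         },
--         "grading": {
--             "O": 10, "A+": 9, "A": 8, "B+": 7, "B": 6, "C": 5, "F": 0
--         }
--     }
-- }
--
-- def calculate_grade_point(marks, scheme):
--     """Calculate grade point based on marks and VTU scheme"""
--     if scheme not in VTU_SCHEMES:
--         return 0
--
--     marks_to_grade = VTU_SCHEMES[scheme]["marks_to_grade"]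
--     grading = VTU_SCHEMES[scheme]["grading"]
--
--     # Find the appropriate grade
--     grade = "F"  # Default to F
--     for threshold, grade_letter in sorted(marks_to_grade.items(), reverse=True):
--         if marks >= threshold:
--             grade = grade_letter
--             break
--
--     # Return grade point
--     return grading.get(grade, 0)
-- ===== SOURCE B (Python) =====
-- _SCHEMES = ("2018", "2021", "2022")
-- _THRESHOLDS = [0, 40, 50, 60, 70, 80, 90]
-- _POINTS = [0, 5, 6, 7, 8, 9, 10]
--
--
-- def calculate_grade_point(marks, scheme):
--     """Calculate grade point based on marks and VTU scheme"""
--     if scheme not in _SCHEMES: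
--         return 0
--     # binary search: rightmost bracket whose threshold is <= marks
--     lo, hi = 0, len(_THRESHOLDS)
--     while lo < hi:
--         mid = (lo + hi) // 2
--         if marks >= _THRESHOLDS[mid]:
--             lo = mid + 1
--         else:
--             hi = mid
--     if lo == 0:
--         return 0  # marks below every threshold (negative marks)
--     return _POINTS[lo - 1]
-- ===== Notes on version B (the rewrite author's own statement) =====
-- stated objective: alternative
-- what changed: Replaces A's linear scan over the reverse-sorted (threshold, grade) dict items with a hand-written binary search (bisect_right) over ascending parallel threshold/point tables, skipping the grade-letter indirection entirely.
import Mathlib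
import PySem

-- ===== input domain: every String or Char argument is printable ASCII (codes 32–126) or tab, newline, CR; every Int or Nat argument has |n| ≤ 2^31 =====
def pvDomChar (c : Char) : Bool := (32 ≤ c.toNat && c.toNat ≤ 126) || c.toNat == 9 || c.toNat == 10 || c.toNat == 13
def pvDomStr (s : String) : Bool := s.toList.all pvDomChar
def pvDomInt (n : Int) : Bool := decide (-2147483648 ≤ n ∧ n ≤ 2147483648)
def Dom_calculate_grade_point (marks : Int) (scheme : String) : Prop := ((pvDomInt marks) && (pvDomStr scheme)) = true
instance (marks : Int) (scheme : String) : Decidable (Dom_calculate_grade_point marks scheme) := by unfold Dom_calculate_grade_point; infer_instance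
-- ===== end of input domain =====

-- B replaces A's linear scan over the reverse-sorted threshold table by a binary search
-- over ascending parallel threshold/point lists (objective: alternative; same exact values).

-- ===== PORT A =====
-- VTU_SCHEMES: the three schemes share identical tables; ported as the key list plus the
-- two inner dicts (insertion order preserved).
def vtuSchemeKeys : List String := ["2022", "2021", "2018"]

def vtuMarksToGrade : PySem.Dict Int String :=
  PySem.Dict.ofList [(90, "O"), (80, "A+"), (70, "A"), (60, "B+"), (50, "B"), (40, "C"), (0, "F")]

def vtuGrading : PySem.Dict String Int :=
  PySem.Dict.ofList [("O", 10), ("A+", 9), ("A", 8), ("B+", 7), ("B", 6), ("C", 5), ("F", 0)]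

-- the for-loop with break: first (threshold, letter) with marks >= threshold wins; default "F"
def findGradeLoop (marks : Int) : List (Int × String) → String
  | [] => "F"
  | (threshold, gradeLetter) :: rest =>
      if marks ≥ threshold then gradeLetter else findGradeLoop marks rest

def calculate_grade_point (marks : Int) (scheme : String) : Int :=
  if vtuSchemeKeys.contains scheme then
    -- sorted(marks_to_grade.items(), reverse=True); dict keys are distinct so sorting
    -- the pairs by their first component is exactly Python's tuple sort here
    let sortedItems := PySem.List.sorted (PySem.Dict.items vtuMarksToGrade) (fun p => p.1) true
    let grade := findGradeLoop marks sortedItems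
    PySem.Dict.getD vtuGrading grade 0
  else 0

-- ===== PORT B =====
def altSchemes : List String := ["2018", "2021", "2022"]
def altThresholds : List Int := [0, 40, 50, 60, 70, 80, 90]
def altPoints : List Int := [0, 5, 6, 7, 8, 9, 10]

-- the while lo < hi loop; fuel only guarantees termination (7 iterations suffice)
def bisectLoop (marks : Int) : Nat → Nat → Nat → Nat
  | 0, lo, _ => lo
  | fuel + 1, lo, hi =>
      if lo < hi then
        let mid := (lo + hi) / 2
        if marks ≥ altThresholds.getD mid 0 then bisectLoop marks fuel (mid + 1) hi
        else bisectLoop marks fuel lo mid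
      else lo

def calculate_grade_point_alt (marks : Int) (scheme : String) : Int :=
  if altSchemes.contains scheme then
    let lo := bisectLoop marks altThresholds.length 0 altThresholds.length
    if lo = 0 then 0 else altPoints.getD (lo - 1) 0
  else 0

-- ===== PRECONDITION & SPEC =====
def Spec_calculate_grade_point (marks : Int) (scheme : String) (out : Int) : Prop := out = calculate_grade_point_alt marks scheme
instance (marks : Int) (scheme : String) (out : Int) : Decidable (Spec_calculate_grade_point marks scheme out) := by unfold Spec_calculate_grade_point; infer_instance

-- ===== CLAIM (what is proved, stated in full; the proofs are below) =====
def Claim_equal_calculate_grade_point : Prop := ∀ (marks : Int) (scheme : String), Dom_calculate_grade_point marks scheme → Spec_calculate_grade_point marks scheme (calculate_grade_point marks scheme)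

-- ===== LEMMAS AND PROOFS =====
lemma contains_eq (scheme : String) :
    altSchemes.contains scheme = vtuSchemeKeys.contains scheme := by
  simp only [altSchemes, vtuSchemeKeys, List.contains_eq_mem, List.mem_cons,
    List.not_mem_nil, or_false, decide_eq_decide]
  tauto

lemma sorted_items_eq :
    PySem.List.sorted (PySem.Dict.items vtuMarksToGrade) (fun p => p.1) true =
      [(90, "O"), (80, "A+"), (70, "A"), (60, "B+"), (50, "B"), (40, "C"), (0, "F")] := by
  decide

-- the binary search on the concrete 7-entry table, evaluated to its decision tree
lemma bisect_eval (marks : Int) : bisectLoop marks 7 0 7 =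
    (if marks ≥ 60 then
       (if marks ≥ 80 then (if marks ≥ 90 then 7 else 6) else (if marks ≥ 70 then 5 else 4))
     else
       (if marks ≥ 40 then (if marks ≥ 50 then 3 else 2) else (if marks ≥ 0 then 1 else 0))) := rfl

-- ===== VERDICT (by name: the statement is the Claim_ definition above) =====
theorem calculate_grade_point_spec : Claim_equal_calculate_grade_point := by
  intro marks scheme _
  unfold Spec_calculate_grade_point calculate_grade_point calculate_grade_point_alt
  rw [contains_eq, sorted_items_eq]
  by_cases h : vtuSchemeKeys.contains scheme = true
  · simp only [h, if_true]
    show PySem.Dict.getD vtuGrading (findGradeLoop marks _) 0 = _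
    show _ = (if bisectLoop marks 7 0 7 = 0 then (0:Int)
              else altPoints.getD (bisectLoop marks 7 0 7 - 1) 0)
    rw [bisect_eval]
    by_cases h60 : marks ≥ 60 <;> by_cases h80 : marks ≥ 80 <;>
      by_cases h90 : marks ≥ 90 <;> by_cases h70 : marks ≥ 70 <;>
      by_cases h50 : marks ≥ 50 <;> by_cases h40 : marks ≥ 40 <;>
      by_cases h0 : marks ≥ 0 <;>
      first
        | omega
        | (simp only [findGradeLoop, h60, h80, h90, h70, h50, h40, h0]
           decide)
  · rw [if_neg (by simpa [List.contains_eq_mem] using h), if_neg (by simpa [List.contains_eq_mem] using h)]
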